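-- pv_equiv track=rewrite | github.com/Korolevlvan/FIT-222--Korolev-Ivan | Олимпиадки/Золотая рыбка/gold-fish.py | substractLL
-- ===== SOURCE A (Python) =====
-- def substractLL(a, A, AA, B):
--     d = 0
--     for pair in B:
--         if pair[0] == a and (pair[1] in AA):
--             if (A[pair[0]] >= B[pair]) and (AA[pair[1]] >= B[pair]):
--                 A[pair[0]] = A[pair[0]] - B[pair]
--                 AA[pair[1]] = AA[pair[1]] - B[pair]
--                 d += B[pair]
--                 B[pair] = 0
--             else:
--                 if(A[pair[0]] >= AA[pair[1]]):
--                     A[pair[0]] -= AA[pair[1]]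
--                     B[pair] -= AA[pair[1]]
--                     d += AA[pair[1]]
--                     AA[pair[1]] = 0
--                 else:
--                     AA[pair[1]] -= A[pair[0]]
--                     B[pair] -= A[pair[0]]
--                     d += A[pair[0]]
--                     A[pair[0]] = 0
--     return d
-- ===== SOURCE B (Python) =====
-- def substractLL(a, A, AA, B):
--     # Two staged passes, no mutation of the input dicts (A mutates them in place;
--     # equivalence is about the return value only).
--     # Stage 1: each key of B is distinct, so AA[k1] and B[(k0,k1)] are each touched
--     # at most once by the original loop; precompute their capped flow.
--     caps = [min(AA[k1], B[(k0, k1)]) for (k0, k1) in B if k0 == a and k1 in AA]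
--     if not caps:
--         return 0
--     # Stage 2: only A[a] carries state across iterations; water-fill it over caps.
--     start = A[a]
--     rem = start
--     for c in caps:
--         rem -= min(rem, c)
--     return start - rem
-- ===== Notes on version B (the rewrite author's own statement) =====
-- stated objective: alternative
-- what changed: Instead of one pass mutating three dicts with a three-way branch, B makes two staged pure passes: it first extracts the list of capped flows min(AA[k1], B[(a,k1)]) (each such cell is touched at most once since B's keys are distinct), then water-fills the single stateful cell A[a] over that list (rem -= min(rem, c)) and returns start - rem; B does not mutate its arguments (equivalence is on the return value).
import Mathlib
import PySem

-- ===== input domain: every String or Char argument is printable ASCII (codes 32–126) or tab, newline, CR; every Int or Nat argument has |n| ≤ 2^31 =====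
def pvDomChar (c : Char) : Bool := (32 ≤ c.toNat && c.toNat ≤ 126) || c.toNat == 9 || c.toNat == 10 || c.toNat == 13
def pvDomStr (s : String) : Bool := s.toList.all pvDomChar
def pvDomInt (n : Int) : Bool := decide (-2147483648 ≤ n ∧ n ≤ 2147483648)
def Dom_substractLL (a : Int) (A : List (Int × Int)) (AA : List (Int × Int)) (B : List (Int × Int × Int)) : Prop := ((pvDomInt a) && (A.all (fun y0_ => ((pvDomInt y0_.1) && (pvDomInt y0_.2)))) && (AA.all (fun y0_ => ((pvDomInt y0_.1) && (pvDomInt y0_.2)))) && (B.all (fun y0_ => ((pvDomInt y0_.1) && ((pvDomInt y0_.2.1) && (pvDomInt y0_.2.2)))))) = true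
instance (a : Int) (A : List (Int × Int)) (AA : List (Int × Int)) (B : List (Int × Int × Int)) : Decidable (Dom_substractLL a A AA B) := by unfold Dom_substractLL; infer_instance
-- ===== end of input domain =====

-- B replaces A's single mutating pass (three-way branch over three dicts) by two pure
-- staged passes: extract the capped-flow list, then water-fill A[a] over it; Python A
-- mutates its dict arguments in place, B does not — the theorems are about the return value.

-- ===== PORT A =====
-- loop body of A: state is (dict A, dict AA, dict B, d); `pair` is a key of B
def pvStepA (a : Int)
    (st : PySem.Dict Int Int × PySem.Dict Int Int × PySem.Dict (Int × Int) Int × Int)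
    (p : Int × Int) :
    PySem.Dict Int Int × PySem.Dict Int Int × PySem.Dict (Int × Int) Int × Int :=
  if p.1 == a && st.2.1.contains p.2 then
    -- A[pair[0]] raises KeyError when a is not a key of A: excluded by Pre_ (the getD default is never read inside Pre_)
    let Av := st.1.getD p.1 0
    let AAv := st.2.1.getD p.2 0
    let Bv := st.2.2.1.getD p 0
    if Av ≥ Bv ∧ AAv ≥ Bv then
      (st.1.insert p.1 (Av - Bv), st.2.1.insert p.2 (AAv - Bv), st.2.2.1.insert p 0, st.2.2.2 + Bv)
    else if Av ≥ AAv then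
      (st.1.insert p.1 (Av - AAv), st.2.1.insert p.2 0, st.2.2.1.insert p (Bv - AAv), st.2.2.2 + AAv)
    else
      (st.1.insert p.1 0, st.2.1.insert p.2 (AAv - Av), st.2.2.1.insert p (Bv - Av), st.2.2.2 + Av)
  else st

def substractLL (a : Int) (A : List (Int × Int)) (AA : List (Int × Int)) (B : List (Int × Int × Int)) : Int :=
  let dB := PySem.Dict.ofList (B.map (fun t => ((t.1, t.2.1), t.2.2)))
  (dB.keys.foldl (pvStepA a) (PySem.Dict.ofList A, PySem.Dict.ofList AA, dB, 0)).2.2.2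

-- ===== PORT B =====
-- stage 1: the capped flows [min(AA[k1], B[(k0,k1)]) for (k0,k1) in B if k0 == a and k1 in AA]
-- stage 2: rem -= min(rem, c) over that list; return start - rem
def substractLL_alt (a : Int) (A : List (Int × Int)) (AA : List (Int × Int)) (B : List (Int × Int × Int)) : Int :=
  let dA := PySem.Dict.ofList A
  let dAA := PySem.Dict.ofList AA
  let dB := PySem.Dict.ofList (B.map (fun t => ((t.1, t.2.1), t.2.2)))
  let caps := (dB.keys.filter (fun p => p.1 == a && dAA.contains p.2)).map
      (fun p => min (dAA.getD p.2 0) (dB.getD p 0))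
  if caps.isEmpty then 0
  else
    let start := dA.getD a 0
    let rem := caps.foldl (fun r c => r - min r c) start
    start - rem

-- ===== PRECONDITION & SPEC =====
-- Pre_ excludes exactly the inputs on which Python A (and Python B) raises KeyError:
-- some entry of B matches (first component = a, second a key of AA) while a is not a key of A.
def Pre_substractLL (a : Int) (A : List (Int × Int)) (AA : List (Int × Int)) (B : List (Int × Int × Int)) : Prop :=
  ∀ t ∈ B, t.1 = a → t.2.1 ∈ AA.map Prod.fst → a ∈ A.map Prod.fst
instance (a : Int) (A : List (Int × Int)) (AA : List (Int × Int)) (B : List (Int × Int × Int)) : Decidable (Pre_substractLL a A AA B) := by unfold Pre_substractLL; infer_instance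

def pvWitness_substractLL : Int × (List (Int × Int)) × (List (Int × Int)) × (List (Int × Int × Int)) :=
  (1, [(1, 5)], [(2, 3)], [(1, 2, 4)])

def Spec_substractLL (a : Int) (A : List (Int × Int)) (AA : List (Int × Int)) (B : List (Int × Int × Int)) (out : Int) : Prop := out = substractLL_alt a A AA B
instance (a : Int) (A : List (Int × Int)) (AA : List (Int × Int)) (B : List (Int × Int × Int)) (out : Int) : Decidable (Spec_substractLL a A AA B out) := by unfold Spec_substractLL; infer_instance

-- ===== CLAIM (what is proved, stated in full; the proofs are below) =====
def Claim_equal_substractLL : Prop := ∀ (a : Int) (A : List (Int × Int)) (AA : List (Int × Int)) (B : List (Int × Int × Int)), Dom_substractLL a A AA B → Pre_substractLL a A AA B → Spec_substractLL a A AA B (substractLL a A AA B)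

-- ===== LEMMAS AND PROOFS =====

-- proof-only helpers: the greedy sum of mins, and B's capped-flow list over a key list
def pvGreedy : Int → List Int → Int
  | _, [] => 0
  | r, c :: cs => min r c + pvGreedy (r - min r c) cs

def pvCaps (a : Int) (dAA : PySem.Dict Int Int) (dB : PySem.Dict (Int × Int) Int)
    (K : List (Int × Int)) : List Int :=
  (K.filter (fun p => p.1 == a && dAA.contains p.2)).map
    (fun p => min (dAA.getD p.2 0) (dB.getD p 0))

-- A's fold, over a duplicate-free key list, accumulates exactly the greedy sum of the
-- capped flows taken at the initial dict values (each AA/B cell is touched at most once)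
theorem pvFoldA_eq (a : Int) (K : List (Int × Int)) (hK : K.Nodup)
    (dA dAA : PySem.Dict Int Int) (dB : PySem.Dict (Int × Int) Int) (d : Int) :
    (K.foldl (pvStepA a) (dA, dAA, dB, d)).2.2.2 = d + pvGreedy (dA.getD a 0) (pvCaps a dAA dB K) := by
  induction K generalizing dA dAA dB d with
  | nil => simp [pvGreedy, pvCaps]
  | cons p t ih =>
    have hpt : p ∉ t := (List.nodup_cons.mp hK).1
    have ht : t.Nodup := (List.nodup_cons.mp hK).2
    by_cases hg : (p.1 == a && dAA.contains p.2) = true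
    · have ha : p.1 = a := beq_iff_eq.mp ((Bool.and_eq_true ..).mp hg).1
      have hc : dAA.contains p.2 = true := ((Bool.and_eq_true ..).mp hg).2
      set Av := dA.getD p.1 0 with hAv
      set AAv := dAA.getD p.2 0 with hAAv
      set Bv := dB.getD p 0 with hBv
      set m := min Av (min AAv Bv) with hm
      have hstep : pvStepA a (dA, dAA, dB, d) p =
          (dA.insert p.1 (Av - m), dAA.insert p.2 (AAv - m), dB.insert p (Bv - m), d + m) := by
        unfold pvStepA
        rw [if_pos hg]
        by_cases h1 : Av ≥ Bv ∧ AAv ≥ Bv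
        · rw [if_pos h1]
          have hmB : m = Bv := by omega
          rw [hmB]
          simp only [Prod.mk.injEq]
          exact ⟨rfl, rfl, by rw [sub_self], rfl⟩
        · rw [if_neg h1]
          by_cases h2 : Av ≥ AAv
          · rw [if_pos h2]
            have hmA : m = AAv := by omega
            rw [hmA]
            norm_num
            exact ⟨rfl, rfl, rfl⟩
          · rw [if_neg h2]
            have hmV : m = Av := by omega
            rw [hmV]
            norm_num
            exact ⟨rfl, rfl, rfl⟩
      -- the tail reads the untouched cells: caps over t are unchanged by the step
      have hfilt : t.filter (fun q => q.1 == a && (dAA.insert p.2 (AAv - m)).contains q.2)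
          = t.filter (fun q => q.1 == a && dAA.contains q.2) := by
        apply List.filter_congr
        intro q _
        rw [PySem.Dict.contains_insert]
        by_cases h2 : q.2 = p.2
        · rw [h2]
          simp [hc]
        · have hb : (q.2 == p.2) = false := beq_eq_false_iff_ne.mpr h2
          simp [hb]
      have hcaps : pvCaps a (dAA.insert p.2 (AAv - m)) (dB.insert p (Bv - m)) t = pvCaps a dAA dB t := by
        unfold pvCaps
        rw [hfilt]
        apply List.map_congr_left
        intro q hq
        have hq' := List.mem_filter.mp hq
        have hqa : q.1 = a := beq_iff_eq.mp ((Bool.and_eq_true ..).mp hq'.2).1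
        have hqne : q ≠ p := fun h => hpt (h ▸ hq'.1)
        have h2 : q.2 ≠ p.2 := by
          intro h2
          exact hqne (Prod.ext (hqa.trans ha.symm) h2)
        simp only [PySem.Dict.getD_insert, if_neg h2, if_neg hqne]
      -- caps over p :: t start with min AAv Bv
      have hcapshd : pvCaps a dAA dB (p :: t) = min AAv Bv :: pvCaps a dAA dB t := by
        simp only [pvCaps, List.filter_cons, hg, if_true, List.map_cons]
        rfl
      rw [List.foldl_cons, hstep, ih ht, hcaps, hcapshd]
      have hgA : (dA.insert p.1 (Av - m)).getD a 0 = Av - m := by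
        rw [ha, hAv, ha]
        exact PySem.Dict.getD_insert_self ..
      rw [hgA]
      have hgB : dA.getD a 0 = Av := by rw [hAv, ha]
      rw [hgB]
      show d + m + pvGreedy (Av - m) _ = d + (min Av (min AAv Bv) + pvGreedy (Av - min Av (min AAv Bv)) _)
      rw [← hm]
      omega
    · have hcaps : pvCaps a dAA dB (p :: t) = pvCaps a dAA dB t := by
        simp [pvCaps, hg]
      rw [List.foldl_cons]
      unfold pvStepA
      rw [if_neg hg, hcaps]
      exact ih ht dA dAA dB d

-- the greedy sum equals start minus the water-filled remainder
theorem pvGreedy_eq_sub (caps : List Int) (r : Int) :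
    pvGreedy r caps = r - caps.foldl (fun s c => s - min s c) r := by
  induction caps generalizing r with
  | nil => simp [pvGreedy]
  | cons c cs ih =>
    rw [List.foldl_cons]
    show min r c + pvGreedy (r - min r c) cs = _
    rw [ih (r - min r c)]
    omega

-- greedy, in the exact shape of B's body (empty caps handled separately)
theorem pvGreedy_eq_alt_body (s : Int) (L : List Int) :
    (0 : Int) + pvGreedy s L
      = if L.isEmpty then 0 else s - L.foldl (fun r c => r - min r c) s := by
  cases L with
  | nil => simp [pvGreedy]
  | cons c cs =>
    simp only [List.isEmpty_cons, if_false, Bool.false_eq_true]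
    rw [pvGreedy_eq_sub]
    omega

-- ===== VERDICT (by name: the statement is the Claim_ definition above) =====
theorem substractLL_spec : Claim_equal_substractLL := by
  intro a A AA B _ _
  unfold Spec_substractLL substractLL substractLL_alt
  have hnd : (PySem.Dict.ofList (B.map (fun t => ((t.1, t.2.1), t.2.2)))).keys.Nodup :=
    PySem.Dict.nodup_keys_ofList _
  rw [pvFoldA_eq a _ hnd]
  exact pvGreedy_eq_alt_body _ _
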